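-- pv_equiv track=rewrite | github.com/ihlar/aoc21 | 3/solution.py | count
-- ===== SOURCE A (Python) =====
-- def count(pos, nums):
--     count0 = 0
--     count1 = 0
--     for num in nums:
--         if num[pos] == '0':
--             count0 += 1
--         else:
--             count1 += 1
--     return (count0, count1)
-- ===== SOURCE B (Python) =====
-- def count(pos, nums):
--     if not nums:
--         return (0, 0)
--     if len(nums) == 1:
--         return (1, 0) if nums[0][pos] == '0' else (0, 1)
--     mid = len(nums) // 2
--     z1, o1 = count(pos, nums[:mid])
--     z2, o2 = count(pos, nums[mid:])
--     return (z1 + z2, o1 + o2)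
-- ===== Notes on version B (the rewrite author's own statement) =====
-- stated objective: alternative
-- what changed: B replaces A's single linear pass with two running counters by a divide-and-conquer recursion: split the list at the midpoint, count each half recursively, and add the two pair results component-wise (singleton lists are the base case).
import Mathlib
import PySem

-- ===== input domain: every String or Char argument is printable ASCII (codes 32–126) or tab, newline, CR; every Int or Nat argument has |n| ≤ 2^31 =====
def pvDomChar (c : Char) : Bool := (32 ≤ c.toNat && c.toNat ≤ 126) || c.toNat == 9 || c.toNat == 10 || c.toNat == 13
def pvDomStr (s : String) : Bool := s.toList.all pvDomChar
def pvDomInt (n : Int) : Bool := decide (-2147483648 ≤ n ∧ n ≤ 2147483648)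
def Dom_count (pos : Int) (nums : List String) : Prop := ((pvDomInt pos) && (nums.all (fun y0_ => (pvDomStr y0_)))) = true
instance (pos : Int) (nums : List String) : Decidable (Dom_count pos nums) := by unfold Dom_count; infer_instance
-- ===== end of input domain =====

-- B counts by divide-and-conquer (split at the midpoint, recurse on both halves, add the pairs) instead of A's single pass with two counters; objective: alternative.


-- ===== PORT A =====
-- two counters, branch per element (num[pos] == '0' → count0 else count1)
def count (pos : Int) (nums : List String) : Int × Int :=
  nums.foldl
    (fun c num =>
      if PySem.Str.pyGet? num pos = some '0' then (c.1 + 1, c.2) else (c.1, c.2 + 1))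
    (0, 0)

-- ===== PORT B =====
-- divide and conquer: empty → (0,0); singleton → test its pos-th char; else split at mid = len//2,
-- recurse on nums[:mid] and nums[mid:], add the two pairs component-wise
def count_alt (pos : Int) (nums : List String) : Int × Int :=
  match nums with
  | [] => (0, 0)
  | [num] => if PySem.Str.pyGet? num pos = some '0' then (1, 0) else (0, 1)
  | a :: b :: rest =>
    let l := a :: b :: rest
    let mid : Nat := l.length / 2
    let p1 := count_alt pos (PySem.List.slice l none (some (mid : Int)))
    let p2 := count_alt pos (PySem.List.slice l (some (mid : Int)) none)
    (p1.1 + p2.1, p1.2 + p2.2)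
termination_by nums.length
decreasing_by
  · rw [PySem.List.slice_to_natCast]; simp only [List.length_take, List.length_cons]; omega
  · rw [PySem.List.slice_from_natCast]; simp only [List.length_drop, List.length_cons]; omega

-- ===== PRECONDITION & SPEC =====
-- A raises IndexError when num[pos] is out of range for some num; exactly those inputs are excluded.
def Pre_count (pos : Int) (nums : List String) : Prop :=
  ∀ num ∈ nums, PySem.Raise.InRange num.toList.length pos
instance (pos : Int) (nums : List String) : Decidable (Pre_count pos nums) := by unfold Pre_count; infer_instance
def pvWitness_count : Int × List String := (1, ["01", "10", "11"])
def Spec_count (pos : Int) (nums : List String) (out : Int × Int) : Prop := out = count_alt pos nums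
instance (pos : Int) (nums : List String) (out : Int × Int) : Decidable (Spec_count pos nums out) := by unfold Spec_count; infer_instance

-- ===== CLAIM (what is proved, stated in full; the proofs are below) =====
def Claim_equal_count : Prop := ∀ (pos : Int) (nums : List String), Dom_count pos nums → Pre_count pos nums → Spec_count pos nums (count pos nums)


-- ===== LEMMAS AND PROOFS =====
-- both programs compute (#zeros, #non-zeros); countP over this predicate is the common characterisation
def pz (pos : Int) (num : String) : Bool := PySem.Str.pyGet? num pos == some '0'

lemma count_alt_eq_countP (pos : Int) : ∀ (n : Nat) (nums : List String), nums.length ≤ n →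
    count_alt pos nums
    = ((nums.countP (pz pos) : Int), (nums.countP (fun num => !pz pos num) : Int)) := by
  intro n
  induction n with
  | zero =>
    intro nums h
    have : nums = [] := List.eq_nil_of_length_eq_zero (Nat.le_zero.mp h)
    subst this
    simp only [count_alt, List.countP_nil, Nat.cast_zero]
  | succ n ih =>
    intro nums h
    match nums with
    | [] => simp only [count_alt, List.countP_nil, Nat.cast_zero]
    | [num] =>
      rw [count_alt]
      by_cases hp : PySem.Str.pyGet? num pos = some '0'
      · have hz : pz pos num = true := by simp [pz]; simpa using hp
        rw [if_pos hp]
        simp [hz]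
      · have hz : pz pos num = false := by simp [pz]; simpa using hp
        rw [if_neg hp]
        simp [hz]
    | a :: b :: rest =>
      rw [count_alt]
      rw [PySem.List.slice_to_natCast, PySem.List.slice_from_natCast]
      have hlt : rest.length + 2 ≤ n + 1 := by simpa using h
      rw [ih _ (by simp only [List.length_take, List.length_cons]; omega),
          ih _ (by simp only [List.length_drop, List.length_cons]; omega)]
      have hsplit := List.take_append_drop ((a :: b :: rest).length / 2) (a :: b :: rest)
      have h1 : (List.take ((a :: b :: rest).length / 2) (a :: b :: rest)).countP (pz pos)
          + (List.drop ((a :: b :: rest).length / 2) (a :: b :: rest)).countP (pz pos)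
          = (a :: b :: rest).countP (pz pos) := by
        conv_rhs => rw [← hsplit]
        rw [List.countP_append]
      have h2 : (List.take ((a :: b :: rest).length / 2) (a :: b :: rest)).countP (fun num => !pz pos num)
          + (List.drop ((a :: b :: rest).length / 2) (a :: b :: rest)).countP (fun num => !pz pos num)
          = (a :: b :: rest).countP (fun num => !pz pos num) := by
        conv_rhs => rw [← hsplit]
        rw [List.countP_append]
      refine Prod.ext ?_ ?_
      · show ((List.take _ _).countP (pz pos) : Int) + ((List.drop _ _).countP (pz pos) : Int) = _
        rw [← h1]; push_cast; ring
      · show ((List.take _ _).countP (fun num => !pz pos num) : Int)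
            + ((List.drop _ _).countP (fun num => !pz pos num) : Int) = _
        rw [← h2]; push_cast; ring

lemma count_foldl_eq (pos : Int) (nums : List String) : ∀ (x y : Int),
    nums.foldl
      (fun c num =>
        if PySem.Str.pyGet? num pos = some '0' then (c.1 + 1, c.2) else (c.1, c.2 + 1))
      (x, y)
    = (x + (nums.countP (pz pos) : Int), y + (nums.countP (fun num => !pz pos num) : Int)) := by
  induction nums with
  | nil => intro x y; simp
  | cons a as ih =>
    intro x y
    rw [List.foldl_cons]
    by_cases hq : PySem.Str.pyGet? a pos = some '0'
    · have hz : pz pos a = true := by simp [pz]; simpa using hq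
      rw [if_pos hq, ih]
      refine Prod.ext ?_ ?_ <;> simp [hz] <;> ring
    · have hz : pz pos a = false := by simp [pz]; simpa using hq
      rw [if_neg hq, ih]
      refine Prod.ext ?_ ?_ <;> simp [hz] <;> ring

-- ===== VERDICT (by name: the statement is the Claim_ definition above) =====
theorem count_spec : Claim_equal_count := by
  intro pos nums _ _
  unfold Spec_count count
  rw [count_foldl_eq, count_alt_eq_countP pos nums.length nums le_rfl]
  simp
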